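-- pv_equiv track=rewrite | github.com/yadej/graph_project | modules/binaire.py | recherche_ligne
-- ===== SOURCE A (Python) =====
-- def recherche_ligne(n, table, comp):
--     '''
--     inputs: n (int), table (list), comp (list),
--     outputs: t (list), comp (list)
--     '''
--     t = []
--     p = [[all(table[i][j:n + j]) for j in range(len(table[i]) - n + 1)] for i in range(len(table))]
--     for a in range(len(p)):
--         for b in range(len(p[a]) - n):
--             if p[a][b] and not all(comp[a][b:n + b]):
--                 comp[a][b:n + b] = [1 for _ in range(n)]
--                 t.append([a, a, b, b + n])
--     return t, comp
-- ===== SOURCE B (Python) =====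
-- def recherche_ligne(n, table, comp):
--     '''
--     inputs: n (int), table (list), comp (list),
--     outputs: t (list), comp (list)
--     '''
--     t = []
--     if n <= 0:
--         return t, comp
--     for a, row in enumerate(table):
--         m = len(row) - 2 * n + 1
--         if m <= 0:
--             continue
--         # all-ones-window predicate via a trailing-run-length pass (no per-window all())
--         run = 0
--         good = []
--         for j, v in enumerate(row):
--             run = run + 1 if v else 0
--             if j >= n - 1:
--                 good.append(run >= n)
--         if True not in good[:m]:
--             continue
--         # zero positions of the comp row, scanned once with a pointer; marking is
--         # deferred: 'covered' = end of the last mark, so the window [b, b+n) still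
--         # contains a zero iff the next zero >= max(b, covered) lies before b+n.
--         z = [i for i, v in enumerate(comp[a]) if not v]
--         zi = 0
--         covered = 0
--         marks = []
--         for b in range(m):
--             if not good[b]:
--                 continue
--             lim = covered if covered > b else b
--             while zi < len(z) and z[zi] < lim:
--                 zi += 1
--             if zi < len(z) and z[zi] < b + n:
--                 marks.append(b)
--                 covered = b + n
--         for b in marks:
--             comp[a][b:b + n] = [1] * n
--             t.append([a, a, b, b + n])
--     return t, comp
-- ===== Notes on version B (the rewrite author's own statement) =====
-- stated objective: alternative
-- what changed: B replaces A's per-window all() scans and interleaved slice-testing/mutation of comp by staged passes per row: a trailing-run-length pass yields the all-ones-window predicate, the comp row's zero positions are collected once and consumed by a monotone pointer with a 'covered' end-of-last-mark counter, and the marks are applied to comp in one final pass.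
import Mathlib
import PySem

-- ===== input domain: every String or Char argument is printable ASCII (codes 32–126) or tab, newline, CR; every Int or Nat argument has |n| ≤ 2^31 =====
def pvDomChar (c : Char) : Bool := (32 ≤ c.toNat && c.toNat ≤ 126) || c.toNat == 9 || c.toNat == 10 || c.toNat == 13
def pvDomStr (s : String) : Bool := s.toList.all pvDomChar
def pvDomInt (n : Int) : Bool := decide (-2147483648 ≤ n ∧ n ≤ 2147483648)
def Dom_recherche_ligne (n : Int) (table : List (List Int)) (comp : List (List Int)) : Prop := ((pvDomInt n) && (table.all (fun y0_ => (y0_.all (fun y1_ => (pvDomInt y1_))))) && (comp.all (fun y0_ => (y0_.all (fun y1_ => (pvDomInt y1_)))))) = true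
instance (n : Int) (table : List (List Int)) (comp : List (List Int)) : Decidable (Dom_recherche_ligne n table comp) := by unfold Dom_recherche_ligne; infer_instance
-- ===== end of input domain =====

-- B replaces A's per-window all() scans and its interleaved testing/mutation of comp by
-- staged passes per row (trailing-run-length window predicate; the comp row's zero
-- positions collected once and consumed by a monotone pointer with a 'covered' counter;
-- marks applied to comp at the end).  Both Pythons mutate comp in place; the equivalence
-- proved is about the returned pair (which contains the mutated comp).

-- ===== PORT A =====
-- all(l) on a list of ints: no zero element
def pyAllNZ (l : List Int) : Bool := l.all (fun v => v != 0)

-- comp[a][b:n+b] = [1]*n  (b ≥ 0; Python slice-assignment clamps both bounds to the length)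
def setOnes (row : List Int) (b nn : Nat) : List Int :=
  row.take b ++ List.replicate nn 1 ++ row.drop (b + nn)

-- [all(table[i][j:n+j]) for j in range(len(table[i]) - n + 1)]
def windowsRow (n : Int) (row : List Int) : List Bool :=
  (PySem.List.pyRange 0 ((row.length : Int) - n + 1) 1).map
    (fun j => pyAllNZ (PySem.List.slice row (some j) (some (n + j))))

-- for b in range(len(p[a]) - n): …   (cnt = iterations left, b = current index)
def loopA (n : Int) (pa : List Bool) (a : Nat) (b : Nat) (cnt : Nat)
    (t : List (List Int)) (comp : List (List Int)) : List (List Int) × List (List Int) :=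
  match cnt with
  | 0 => (t, comp)
  | cnt' + 1 =>
    if PySem.List.pyGetD pa (b : Int) false
        && !(pyAllNZ (PySem.List.slice (comp.getD a []) (some (b : Int)) (some (n + (b : Int))))) then
      loopA n pa a (b + 1) cnt'
        (t ++ [[(a : Int), (a : Int), (b : Int), (b : Int) + n]])
        (comp.set a (setOnes (comp.getD a []) b n.toNat))
    else
      loopA n pa a (b + 1) cnt' t comp

-- for a in range(len(p)): …
def rowsA (n : Int) (p : List (List Bool)) (a : Nat)
    (t : List (List Int)) (comp : List (List Int)) : List (List Int) × List (List Int) :=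
  match p with
  | [] => (t, comp)
  | pa :: rest =>
    let r := loopA n pa a 0 (((pa.length : Int) - n).toNat) t comp
    rowsA n rest (a + 1) r.1 r.2

def recherche_ligne (n : Int) (table : List (List Int)) (comp : List (List Int)) :
    List (List Int) × List (List Int) :=
  let p := table.map (fun row => windowsRow n row)
  rowsA n p 0 [] comp

-- ===== PORT B =====
-- run = trailing count of nonzeros; good[j-(n-1)] = (run >= n)
def runGood (n : Int) (row : List Int) : List Bool :=
  (row.foldl
    (fun (st : Int × Int × List Bool) v =>
      let run := if v != 0 then st.2.1 + 1 else (0 : Int)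
      (st.1 + 1, run, if n - 1 ≤ st.1 then st.2.2 ++ [decide (n ≤ run)] else st.2.2))
    (0, 0, [])).2.2

-- z = [i for i, v in enumerate(comp[a]) if not v]
def zerosOf (c : List Int) : List Int :=
  ((PySem.List.enumerate c 0).filter (fun p => p.2 == 0)).map (fun p => p.1)

-- while zi < len(z) and z[zi] < lim: zi += 1   (structural: walks the suffix z[zi:])
def advAux (lim : Int) (zi : Nat) : List Int → Nat
  | [] => zi
  | x :: rest => if x < lim then advAux lim (zi + 1) rest else zi

def adv (z : List Int) (lim : Int) (zi : Nat) : Nat := advAux lim zi (z.drop zi)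

-- for b in range(m): …  (collects the mark starts; comp untouched)
def loopG (n : Int) (good : List Bool) (z : List Int) (b : Nat) (cnt : Nat)
    (zi : Nat) (covered : Int) (marks : List Nat) : List Nat :=
  match cnt with
  | 0 => marks
  | cnt' + 1 =>
    if good.getD b false then
      let lim := if covered > (b : Int) then covered else (b : Int)
      let zi' := adv z lim zi
      if zi' < z.length ∧ z.getD zi' 0 < (b : Int) + n then
        loopG n good z (b + 1) cnt' zi' ((b : Int) + n) (marks ++ [b])
      else
        loopG n good z (b + 1) cnt' zi' covered marks
    else
      loopG n good z (b + 1) cnt' zi covered marks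

-- for b in marks: comp[a][b:b+n] = [1]*n; t.append([a, a, b, b+n])
def applyMarks (n : Int) (a : Nat) (marks : List Nat)
    (t : List (List Int)) (comp : List (List Int)) : List (List Int) × List (List Int) :=
  marks.foldl
    (fun (st : List (List Int) × List (List Int)) (b : Nat) =>
      (st.1 ++ [[(a : Int), (a : Int), (b : Int), (b : Int) + n]],
       st.2.set a (setOnes (st.2.getD a []) b n.toNat)))
    (t, comp)

-- for a, row in enumerate(table): …
def rowsB (n : Int) (rows : List (List Int)) (a : Nat)
    (t : List (List Int)) (comp : List (List Int)) : List (List Int) × List (List Int) :=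
  match rows with
  | [] => (t, comp)
  | row :: rest =>
    let m := (row.length : Int) - 2 * n + 1
    if m ≤ 0 then rowsB n rest (a + 1) t comp
    else
      let good := runGood n row
      if (good.take m.toNat).contains true then
        let marks := loopG n good (zerosOf (comp.getD a [])) 0 m.toNat 0 0 []
        let r := applyMarks n a marks t comp
        rowsB n rest (a + 1) r.1 r.2
      else rowsB n rest (a + 1) t comp

def recherche_ligne_alt (n : Int) (table : List (List Int)) (comp : List (List Int)) :
    List (List Int) × List (List Int) :=
  if n ≤ 0 then ([], comp) else rowsB n table 0 [] comp

-- ===== PRECONDITION & SPEC =====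
-- Pre_ excludes exactly the inputs where Python A raises IndexError: n < 0 with a nonempty
-- table (the b-scan overruns p[a]), and a row index a ≥ len(comp) whose scan reaches an
-- all-nonzero table window (then comp[a] is evaluated and is out of range).
def Pre_recherche_ligne (n : Int) (table : List (List Int)) (comp : List (List Int)) : Prop :=
  (0 ≤ n ∨ table = []) ∧
  (∀ a : Nat, a < table.length → comp.length ≤ a →
    ∀ b : Nat, b < (((table.getD a []).length : Int) - n + 1).toNat - n.toNat →
      pyAllNZ (PySem.List.slice (table.getD a []) (some (b : Int)) (some (n + (b : Int)))) = false)
instance (n : Int) (table : List (List Int)) (comp : List (List Int)) : Decidable (Pre_recherche_ligne n table comp) := by unfold Pre_recherche_ligne; infer_instance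

def pvWitness_recherche_ligne : Int × List (List Int) × List (List Int) :=
  (2, [[1, 1, 0, 1], [0, 1, 1, 1]], [[0, 0, 0, 0], [1, 0, 1, 0]])

def Spec_recherche_ligne (n : Int) (table : List (List Int)) (comp : List (List Int)) (out : List (List Int) × List (List Int)) : Prop := out = recherche_ligne_alt n table comp
instance (n : Int) (table : List (List Int)) (comp : List (List Int)) (out : List (List Int) × List (List Int)) : Decidable (Spec_recherche_ligne n table comp out) := by unfold Spec_recherche_ligne; infer_instance

-- ===== CLAIM (what is proved, stated in full; the proofs are below) =====
def Claim_equal_recherche_ligne : Prop := ∀ (n : Int) (table : List (List Int)) (comp : List (List Int)), Dom_recherche_ligne n table comp → Pre_recherche_ligne n table comp → Spec_recherche_ligne n table comp (recherche_ligne n table comp)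

-- ===== LEMMAS AND PROOFS =====

theorem le_length_setOnes (c : List Int) (b nn : Nat) : c.length ≤ (setOnes c b nn).length := by
  simp [setOnes]; omega

theorem setOnes_getElem? (cs : List Int) (b nn : Nat) (hb : b ≤ cs.length) (i : Nat) :
    (setOnes cs b nn)[i]? = if b ≤ i ∧ i < b + nn then some 1 else cs[i]? := by
  unfold setOnes
  rcases Nat.lt_or_ge i b with h | h
  · rw [if_neg (by omega),
      List.getElem?_append_left (by simp [List.length_take]; omega),
      List.getElem?_append_left (by simp [List.length_take]; omega),
      List.getElem?_take_of_lt h]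
  · rcases Nat.lt_or_ge i (b + nn) with h2 | h2
    · rw [if_pos ⟨h, h2⟩,
        List.getElem?_append_left (by simp [List.length_take]; omega),
        List.getElem?_append_right (by simp [List.length_take]; omega),
        List.getElem?_replicate]
      rw [if_pos (by simp [List.length_take]; omega)]
    · rw [if_neg (by omega),
        List.getElem?_append_right (by simp [List.length_take]; omega),
        List.getElem?_drop]
      congr 1
      simp [List.length_take]
      omega

def applyOnes (nn : Nat) (c0 : List Int) (marks : List Nat) : List Int :=
  marks.foldl (fun c b => setOnes c b nn) c0

theorem applyOnes_getElem? (nn : Nat) (marks : List Nat) : ∀ (c0 : List Int),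
    (∀ b ∈ marks, b < c0.length) → ∀ i : Nat,
    (applyOnes nn c0 marks)[i]? =
      if ∃ b ∈ marks, b ≤ i ∧ i < b + nn then some 1 else c0[i]? := by
  induction marks with
  | nil => intro c0 _ i; simp [applyOnes]
  | cons m ms ih =>
    intro c0 hm i
    have h1 : applyOnes nn c0 (m :: ms) = applyOnes nn (setOnes c0 m nn) ms := rfl
    rw [h1, ih (setOnes c0 m nn)
      (fun b hb => lt_of_lt_of_le (hm b (List.mem_cons_of_mem m hb)) (le_length_setOnes c0 m nn)) i]
    rw [setOnes_getElem? c0 m nn (le_of_lt (hm m List.mem_cons_self)) i]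
    by_cases hms : ∃ b ∈ ms, b ≤ i ∧ i < b + nn
    · rw [if_pos hms, if_pos (by rcases hms with ⟨b, hb, h⟩; exact ⟨b, List.mem_cons_of_mem m hb, h⟩)]
    · rw [if_neg hms]
      by_cases hmm : m ≤ i ∧ i < m + nn
      · rw [if_pos hmm, if_pos ⟨m, List.mem_cons_self, hmm⟩]
      · rw [if_neg hmm, if_neg (by rintro ⟨b, hb, h⟩; rcases List.mem_cons.mp hb with rfl | hb'; exact hmm h; exact hms ⟨b, hb', h⟩)]

theorem mem_zerosOf (cs : List Int) (x : Int) :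
    x ∈ zerosOf cs ↔ ∃ k : Nat, x = (k : Int) ∧ cs[k]? = some 0 := by
  unfold zerosOf
  simp only [List.mem_map, List.mem_filter, PySem.List.mem_enumerate_iff]
  constructor
  · rintro ⟨p, ⟨⟨k, hk, rfl⟩, h2⟩, rfl⟩
    refine ⟨k, by simp, ?_⟩
    simp at h2 ⊢
    rw [List.getElem?_eq_getElem hk]
    simp [h2]
  · rintro ⟨k, rfl, hk⟩
    have hlt : k < cs.length := (List.getElem?_eq_some_iff.mp hk).1
    refine ⟨((k : Int), cs[k]), ⟨⟨k, hlt, by simp⟩, ?_⟩, by simp⟩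
    have := (List.getElem?_eq_some_iff.mp hk).2
    simp [this]

theorem zerosOf_sorted (cs : List Int) : (zerosOf cs).Pairwise (· < ·) := by
  unfold zerosOf
  rw [List.pairwise_map]
  exact (PySem.List.pairwise_lt_enumerate cs 0).filter _

theorem advAux_le_add (lim : Int) : ∀ (s : List Int) (zi : Nat), advAux lim zi s ≤ zi + s.length := by
  intro s
  induction s with
  | nil => intro zi; simp [advAux]
  | cons x rest ih =>
    intro zi
    unfold advAux
    split
    · have := ih (zi + 1); simpa [Nat.add_comm, Nat.add_left_comm] using this
    · omega

theorem drop_cons_head (z : List Int) (zi : Nat) (x : Int) (rest : List Int)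
    (h : z.drop zi = x :: rest) : z[zi]? = some x ∧ z.drop (zi + 1) = rest := by
  constructor
  · have h0 : (z.drop zi)[0]? = z[zi + 0]? := List.getElem?_drop
    rw [h] at h0; simpa using h0.symm
  · have h1 : (z.drop zi).drop 1 = z.drop (zi + 1) := by
      rw [List.drop_drop]
    rw [h] at h1; simpa using h1.symm

theorem adv_passed (z : List Int) (lim : Int) : ∀ (s : List Int) (zi : Nat),
    s = z.drop zi → ∀ k : Nat, zi ≤ k → k < advAux lim zi s → z.getD k 0 < lim := by
  intro s
  induction s with
  | nil => intro zi _ k h1 h2; simp [advAux] at h2; omega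
  | cons x rest ih =>
    intro zi hs k h1 h2
    obtain ⟨hget, hdrop⟩ := drop_cons_head z zi x rest hs.symm
    unfold advAux at h2
    split at h2
    · rcases Nat.eq_or_lt_of_le h1 with rfl | hlt
      · rw [List.getD_eq_getElem?_getD, hget]; simpa using (by assumption : x < lim)
      · exact ih (zi + 1) hdrop.symm k hlt h2
    · omega

theorem adv_stop (z : List Int) (lim : Int) : ∀ (s : List Int) (zi : Nat),
    s = z.drop zi → advAux lim zi s < z.length → lim ≤ z.getD (advAux lim zi s) 0 := by
  intro s
  induction s with
  | nil =>
    intro zi hs h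
    have : z.length ≤ zi := by
      have := congrArg List.length hs; simp at this; omega
    simp [advAux] at h; omega
  | cons x rest ih =>
    intro zi hs h
    obtain ⟨hget, hdrop⟩ := drop_cons_head z zi x rest hs.symm
    unfold advAux at h ⊢
    split_ifs at h ⊢ with hx
    · exact ih (zi + 1) hdrop.symm h
    · rw [List.getD_eq_getElem?_getD, hget]; simp; omega

theorem pyAllNZ_eq_false_iff (l : List Int) : pyAllNZ l = false ↔ (0 : Int) ∈ l := by
  unfold pyAllNZ
  rw [← Bool.not_eq_true, List.all_eq_true]
  push Not
  constructor
  · rintro ⟨x, hx, h⟩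
    simp at h
    rwa [h] at hx
  · intro h
    exact ⟨0, h, by simp⟩

theorem mem_take_drop_zero (cs : List Int) (b nn : Nat) :
    ((0 : Int) ∈ (cs.drop b).take nn) ↔ ∃ j : Nat, j < nn ∧ cs[b + j]? = some (0 : Int) := by
  rw [List.mem_iff_getElem?]
  constructor
  · rintro ⟨j, hj⟩
    have hjlt : j < nn := by
      have := List.getElem?_eq_some_iff.mp hj
      have hlen := this.1
      simp at hlen
      omega
    refine ⟨j, hjlt, ?_⟩
    rw [List.getElem?_take_of_lt hjlt] at hj
    rw [← List.getElem?_drop]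
    exact hj
  · rintro ⟨j, hjlt, hj⟩
    refine ⟨j, ?_⟩
    rw [List.getElem?_take_of_lt hjlt, List.getElem?_drop]
    exact hj

theorem marked_iff (n : Int) (hn : 1 ≤ n) (marks : List Nat) (covered : Int) (b : Nat)
    (Hm : ∀ b' ∈ marks, b' < b ∧ (b' : Int) + n ≤ covered)
    (Hcov : covered = 0 ∨ ∃ bL ∈ marks, covered = (bL : Int) + n)
    (i : Nat) (hi : b ≤ i) :
    (∃ b' ∈ marks, b' ≤ i ∧ i < b' + n.toNat) ↔ (i : Int) < covered := by
  constructor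
  · rintro ⟨b', hb', _, h2⟩
    have h3 := (Hm b' hb').2
    have : (i : Int) < (b' : Int) + (n.toNat : Int) := by exact_mod_cast h2
    omega
  · intro h
    rcases Hcov with rfl | ⟨bL, hbL, rfl⟩
    · omega
    · refine ⟨bL, hbL, by have := (Hm bL hbL).1; omega, ?_⟩
      have : (i : Int) < (bL : Int) + (n.toNat : Int) := by omega
      exact_mod_cast this

-- the heart: on the current comp row (= c0 with the marks painted over), the window
-- [b, b+n) still contains a zero iff c0 has a zero position in [max(b,covered), b+n)
theorem cond_iff (n : Int) (hn : 1 ≤ n) (c0 : List Int) (marks : List Nat) (covered : Int) (b : Nat)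
    (Hm : ∀ b' ∈ marks, b' < b ∧ b' < c0.length ∧ (b' : Int) + n ≤ covered)
    (Hcov : covered = 0 ∨ ∃ bL ∈ marks, covered = (bL : Int) + n) :
    pyAllNZ (PySem.List.slice (applyOnes n.toNat c0 marks) (some (b : Int)) (some (n + (b : Int)))) = false
      ↔ ∃ k : Nat, b ≤ k ∧ covered ≤ (k : Int) ∧ (k : Int) < (b : Int) + n ∧ c0[k]? = some 0 := by
  have hnc : ((n.toNat : Int)) = n := by omega
  have hm1 : ∀ b' ∈ marks, b' < b ∧ (b' : Int) + n ≤ covered :=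
    fun b' h => ⟨(Hm b' h).1, (Hm b' h).2.2⟩
  have hm2 : ∀ b' ∈ marks, b' < c0.length := fun b' h => (Hm b' h).2.1
  have hs : PySem.List.slice (applyOnes n.toNat c0 marks) (some (b : Int)) (some (n + (b : Int)))
      = ((applyOnes n.toNat c0 marks).drop b).take n.toNat := by
    rw [show (n + (b : Int)) = ((b : Int) + (n.toNat : Int)) by omega]
    exact PySem.List.slice_natCast_add _ _ _
  rw [hs, pyAllNZ_eq_false_iff, mem_take_drop_zero]
  constructor
  · rintro ⟨j, hj, hcj⟩
    rw [applyOnes_getElem? n.toNat marks c0 hm2 (b + j)] at hcj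
    split_ifs at hcj with hmark
    · simp at hcj
    · refine ⟨b + j, by omega, ?_, ?_, hcj⟩
      · by_contra hcon
        exact hmark ((marked_iff n hn marks covered b hm1 Hcov (b + j) (by omega)).mpr (by omega))
      · push_cast
        omega
  · rintro ⟨k, hk1, hk2, hk3, hk4⟩
    refine ⟨k - b, by omega, ?_⟩
    rw [show b + (k - b) = k by omega, applyOnes_getElem? n.toNat marks c0 hm2 k, if_neg]
    · exact hk4
    · intro hmark
      have := (marked_iff n hn marks covered b hm1 Hcov k hk1).mp hmark
      omega

theorem getD_set_self' (l : List (List Int)) (a : Nat) (x : List Int) (h : a < l.length) :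
    (l.set a x).getD a [] = x := by
  rw [List.getD_eq_getElem?_getD, List.getElem?_set_self (by simpa using h)]
  rfl

theorem applyMarks_eq (n : Int) (a : Nat) (marks : List Nat) :
    ∀ (t comp : List (List Int)), a < comp.length →
      applyMarks n a marks t comp
        = (t ++ marks.map (fun b => [(a : Int), (a : Int), (b : Int), (b : Int) + n]),
           comp.set a (applyOnes n.toNat (comp.getD a []) marks)) := by
  induction marks with
  | nil =>
    intro t comp hc
    simp only [applyMarks, applyOnes, List.foldl_nil]
    refine Prod.ext (by simp) ?_
    simp only []
    rw [List.getD_eq_getElem?_getD, List.getElem?_eq_getElem hc]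
    simp [List.set_getElem_self]
  | cons m ms ih =>
    intro t comp hc
    have h1 : applyMarks n a (m :: ms) t comp
        = applyMarks n a ms (t ++ [[(a : Int), (a : Int), (m : Int), (m : Int) + n]])
            (comp.set a (setOnes (comp.getD a []) m n.toNat)) := rfl
    rw [h1, ih _ _ (by simpa using hc)]
    refine Prod.ext (by simp) ?_
    simp only []
    rw [getD_set_self' comp a _ hc, List.set_set]
    rfl

theorem loopG_znil (n : Int) (good : List Bool) :
    ∀ (cnt b zi : Nat) (covered : Int) (marks : List Nat),
      loopG n good [] b cnt zi covered marks = marks := by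
  intro cnt
  induction cnt with
  | zero => intro b zi covered marks; rfl
  | succ cnt' ih =>
    intro b zi covered marks
    rw [loopG]
    simp only [adv, List.drop_nil, advAux, List.length_nil]
    rw [if_neg (by omega : ¬ (zi < 0 ∧ ([] : List Int).getD zi 0 < (b : Int) + n))]
    split
    · exact ih _ _ _ _
    · exact ih _ _ _ _

theorem loopA_out (n : Int) (pa : List Bool) (a : Nat) :
    ∀ (cnt b : Nat) (t comp : List (List Int)), comp.length ≤ a →
      loopA n pa a b cnt t comp = (t, comp) := by
  intro cnt
  induction cnt with
  | zero => intro b t comp _; rfl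
  | succ cnt' ih =>
    intro b t comp hc
    rw [loopA]
    rw [List.getD_eq_default _ _ hc]
    have hs : PySem.List.slice ([] : List Int) (some (b : Int)) (some (n + (b : Int))) = [] := by
      rw [show (n + (b : Int)) = ((b : Int) + (n.toNat : Int) + (n - n.toNat)) by ring]
      simp [PySem.List.slice]
    rw [hs]
    simp only [pyAllNZ, List.all_nil, Bool.not_true, Bool.and_false, Bool.false_eq_true, if_false]
    exact ih _ _ _ hc

theorem loopA_nogood (n : Int) (pa : List Bool) (a : Nat) :
    ∀ (cnt b : Nat) (t comp : List (List Int)),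
      (∀ k : Nat, b ≤ k → k < b + cnt → pa.getD k false = false) →
      loopA n pa a b cnt t comp = (t, comp) := by
  intro cnt
  induction cnt with
  | zero => intro b t comp _; rfl
  | succ cnt' ih =>
    intro b t comp hg
    rw [loopA]
    rw [PySem.List.pyGetD_natCast, hg b le_rfl (by omega)]
    simp only [Bool.false_and, Bool.false_eq_true, if_false]
    exact ih (b + 1) t comp (fun k h1 h2 => hg k (by omega) (by omega))

def trunN (q : List Int) : Nat := q.foldl (fun r v => if v != 0 then r + 1 else 0) 0

theorem trunN_append (q : List Int) (v : Int) :
    trunN (q ++ [v]) = if v != 0 then trunN q + 1 else 0 := by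
  simp [trunN, List.foldl_append]

theorem pyAllNZ_append (x : List Int) (v : Int) :
    pyAllNZ (x ++ [v]) = (pyAllNZ x && (v != 0)) := by
  simp [pyAllNZ]

theorem suffix_trun (q : List Int) : ∀ k : Nat, k ≤ q.length →
    pyAllNZ (q.drop (q.length - k)) = decide (k ≤ trunN q) := by
  induction q using List.reverseRecOn with
  | nil => intro k hk; simp at hk; simp [hk, pyAllNZ]
  | append_singleton q v ih =>
    intro k hk
    match k with
    | 0 => simp [pyAllNZ]
    | k' + 1 =>
      simp at hk
      have hd : (q ++ [v]).length - (k' + 1) = q.length - k' := by simp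
      rw [hd, List.drop_append_of_le_length (by omega), pyAllNZ_append, ih k' (by omega),
        trunN_append]
      by_cases hv : v = 0 <;> simp [hv]

def W (nn : Nat) (q : List Int) : List Bool :=
  (List.range (q.length + 1 - nn)).map (fun b => pyAllNZ ((q.drop b).take nn))

theorem W_append (nn : Nat) (hn : 1 ≤ nn) (q : List Int) (v : Int) :
    W nn (q ++ [v]) =
      if nn ≤ q.length + 1 then W nn q ++ [decide (nn ≤ trunN (q ++ [v]))] else W nn q := by
  by_cases h : nn ≤ q.length + 1
  · simp only [h, if_pos]
    unfold W
    have hc : (q ++ [v]).length + 1 - nn = (q.length + 1 - nn) + 1 := by simp; omega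
    rw [hc, List.range_succ, List.map_append]
    congr 1
    · apply List.map_congr_left
      intro b hb
      simp at hb
      rw [List.drop_append_of_le_length (by omega), List.take_append_of_le_length (by simp; omega)]
    · simp only [List.map_cons, List.map_nil]
      congr 1
      have h1 : q.length + 1 - nn = (q ++ [v]).length - nn := by simp
      rw [h1, List.take_of_length_le (by simp; omega),
        suffix_trun (q ++ [v]) nn (by simp; omega)]
  · simp only [h, if_neg, not_false_iff]
    unfold W
    have h1 : (q ++ [v]).length + 1 - nn = 0 := by simp; omega
    have h2 : q.length + 1 - nn = 0 := by omega
    rw [h1, h2]; simp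

theorem runGood_fold (n : Int) (hn : 1 ≤ n) : ∀ (s q : List Int),
    s.foldl
      (fun (st : Int × Int × List Bool) v =>
        let run := if v != 0 then st.2.1 + 1 else (0 : Int)
        (st.1 + 1, run, if n - 1 ≤ st.1 then st.2.2 ++ [decide (n ≤ run)] else st.2.2))
      ((q.length : Int), (trunN q : Int), W n.toNat q)
    = (((q ++ s).length : Int), (trunN (q ++ s) : Int), W n.toNat (q ++ s)) := by
  intro s
  induction s with
  | nil => intro q; simp
  | cons v s' ih =>
    intro q
    have hstep :
        (fun (st : Int × Int × List Bool) v =>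
          let run := if v != 0 then st.2.1 + 1 else (0 : Int)
          (st.1 + 1, run, if n - 1 ≤ st.1 then st.2.2 ++ [decide (n ≤ run)] else st.2.2))
          ((q.length : Int), (trunN q : Int), W n.toNat q) v
        = (((q ++ [v]).length : Int), (trunN (q ++ [v]) : Int), W n.toNat (q ++ [v])) := by
      simp only []
      refine Prod.ext (by simp) (Prod.ext ?_ ?_)
      · simp only [trunN_append]
        by_cases hv : v = 0 <;> simp [hv]
      · simp only [W_append n.toNat (by omega) q v]
        have hg : (n - 1 ≤ (q.length : Int)) ↔ (n.toNat ≤ q.length + 1) := by omega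
        by_cases hc : n - 1 ≤ (q.length : Int)
        · rw [if_pos hc, if_pos (hg.mp hc)]
          simp only [trunN_append]
          congr 1
          by_cases hv : v = 0
          · have hv' : (v != 0) = false := by simp [hv]
            simp only [hv', Bool.false_eq_true, if_false]
            congr 1
            rw [decide_eq_decide]
            omega
          · have hv' : (v != 0) = true := by simpa using hv
            simp only [hv', if_true]
            congr 1
            rw [decide_eq_decide]
            omega
        · rw [if_neg hc, if_neg (fun hh => hc (hg.mpr hh))]
    rw [List.foldl_cons]
    simp only [hstep]
    rw [ih (q ++ [v])]
    simp

theorem runGood_eq_W (n : Int) (hn : 1 ≤ n) (row : List Int) :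
    runGood n row = W n.toNat row := by
  have h := runGood_fold n hn row []
  simp only [List.nil_append] at h
  unfold runGood
  have h0 : W n.toNat ([] : List Int) = [] := by
    unfold W
    have : ([] : List Int).length + 1 - n.toNat = 0 := by simp; omega
    rw [this]; simp
  rw [show ((0 : Int), (0 : Int), ([] : List Bool))
        = ((([] : List Int).length : Int), (trunN ([] : List Int) : Int), W n.toNat []) by
      rw [h0]; rfl, h]

theorem windowsRow_eq_W (n : Int) (hn : 1 ≤ n) (row : List Int) :
    windowsRow n row = W n.toNat row := by
  unfold windowsRow W
  rw [PySem.List.pyRange_one, List.map_map]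
  have hc : ((row.length : Int) - n + 1 - 0).toNat = row.length + 1 - n.toNat := by omega
  rw [hc]
  apply List.map_congr_left
  intro k _
  simp only [Function.comp_apply, zero_add]
  have hb : (n : Int) + (k : Int) = ((n.toNat + k : Nat) : Int) := by omega
  rw [hb, PySem.List.slice_natCast]
  simp

theorem windowsRow_length (n : Int) (row : List Int) :
    (windowsRow n row).length = ((row.length : Int) - n + 1).toNat := by
  unfold windowsRow
  rw [List.length_map, PySem.List.length_pyRange_one]
  congr 1
  omega

theorem loopA_zero (pa : List Bool) (a : Nat) :
    ∀ (cnt b : Nat) (t comp : List (List Int)), loopA 0 pa a b cnt t comp = (t, comp) := by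
  intro cnt
  induction cnt with
  | zero => intro b t comp; rfl
  | succ cnt' ih =>
    intro b t comp
    rw [loopA]
    have hs : PySem.List.slice (comp.getD a []) (some (b : Int)) (some ((0 : Int) + (b : Int))) = [] := by
      rw [Int.zero_add, PySem.List.slice_natCast]
      simp
    rw [hs]
    simp only [pyAllNZ, List.all_nil, Bool.not_true, Bool.and_false, Bool.false_eq_true,
      if_false]
    exact ih _ _ _

theorem rowsA_zero : ∀ (p : List (List Bool)) (a : Nat) (t comp : List (List Int)),
    rowsA 0 p a t comp = (t, comp) := by
  intro p
  induction p with
  | nil => intro a t comp; rfl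
  | cons pa rest ih =>
    intro a t comp
    rw [rowsA]
    simp only [loopA_zero]
    exact ih _ _ _

theorem adv_le_length' (z : List Int) (lim : Int) (zi : Nat) (h : zi ≤ z.length) :
    adv z lim zi ≤ z.length := by
  have := advAux_le_add lim (z.drop zi) zi
  unfold adv
  simp at this
  omega

theorem adv_passed_all (z : List Int) (lim : Int) (zi : Nat)
    (h0 : ∀ k : Nat, k < zi → z.getD k 0 < lim) :
    ∀ k : Nat, k < adv z lim zi → z.getD k 0 < lim := by
  intro k hk
  rcases Nat.lt_or_ge k zi with h | h
  · exact h0 k h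
  · exact adv_passed z lim (z.drop zi) zi rfl k h hk

theorem adv_stop' (z : List Int) (lim : Int) (zi : Nat) (h : adv z lim zi < z.length) :
    lim ≤ z.getD (adv z lim zi) 0 :=
  adv_stop z lim (z.drop zi) zi rfl h

theorem zerosOf_mono (c0 : List Int) (i j : Nat) (hij : i ≤ j) (hj : j < (zerosOf c0).length) :
    (zerosOf c0).getD i 0 ≤ (zerosOf c0).getD j 0 := by
  rcases Nat.eq_or_lt_of_le hij with rfl | hlt
  · exact le_refl _
  · have hi : i < (zerosOf c0).length := by omega
    rw [List.getD_eq_getElem _ _ hi, List.getD_eq_getElem _ _ hj]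
    exact le_of_lt ((List.pairwise_iff_getElem.mp (zerosOf_sorted c0)) i j hi hj hlt)

theorem pointer_iff (n : Int) (c0 : List Int) (b zi : Nat) (covered : Int)
    (_hzi : zi ≤ (zerosOf c0).length)
    (hpassed : ∀ k : Nat, k < zi → (zerosOf c0).getD k 0 < max ((b : Int)) covered) :
    ((adv (zerosOf c0) (max ((b : Int)) covered) zi < (zerosOf c0).length ∧
        (zerosOf c0).getD (adv (zerosOf c0) (max ((b : Int)) covered) zi) 0 < (b : Int) + n) ↔
      ∃ k : Nat, b ≤ k ∧ covered ≤ (k : Int) ∧ (k : Int) < (b : Int) + n ∧ c0[k]? = some 0) := by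
  set z := zerosOf c0 with hz
  set lim := max ((b : Int)) covered with hlim
  set zi' := adv z lim zi with hzi'
  have hple : ∀ k : Nat, k < zi' → z.getD k 0 < lim := adv_passed_all z lim zi hpassed
  constructor
  · rintro ⟨h1, h2⟩
    have hmem : z.getD zi' 0 ∈ z := by
      rw [List.getD_eq_getElem _ _ h1]
      exact List.getElem_mem h1
    obtain ⟨k, hk, hk0⟩ := (mem_zerosOf c0 _).mp hmem
    have hstop := adv_stop' z lim zi h1
    rw [hk] at hstop h2
    exact ⟨k, by omega, by omega, h2, hk0⟩
  · rintro ⟨k, hb, hcov, hlt, h0⟩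
    have hkmem : ((k : Int)) ∈ z := (mem_zerosOf c0 _).mpr ⟨k, rfl, h0⟩
    obtain ⟨idx, hidxlt, hidx⟩ := List.mem_iff_getElem.mp hkmem
    have hidxge : zi' ≤ idx := by
      by_contra hc
      have hpl := hple idx (by omega)
      rw [List.getD_eq_getElem _ _ hidxlt, hidx] at hpl
      omega
    have h1 : zi' < z.length := lt_of_le_of_lt hidxge hidxlt
    refine ⟨h1, ?_⟩
    have hmono : z.getD zi' 0 ≤ z.getD idx 0 := zerosOf_mono c0 zi' idx hidxge hidxlt
    rw [List.getD_eq_getElem _ _ hidxlt, hidx] at hmono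
    omega

theorem loop_eq (n : Int) (hn : 1 ≤ n) (a : Nat) (compE : List (List Int))
    (hC : a < compE.length) (pa : List Bool) :
    ∀ (cnt b zi : Nat) (covered : Int) (marks : List Nat) (t : List (List Int)),
      (∀ b' ∈ marks, b' < b ∧ b' < (compE.getD a []).length ∧ (b' : Int) + n ≤ covered) →
      (covered = 0 ∨ ∃ bL ∈ marks, covered = (bL : Int) + n) →
      zi ≤ (zerosOf (compE.getD a [])).length →
      (∀ k : Nat, k < zi → (zerosOf (compE.getD a [])).getD k 0 < max ((b : Int)) covered) →
      loopA n pa a b cnt (applyMarks n a marks t compE).1 (applyMarks n a marks t compE).2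
        = applyMarks n a (loopG n pa (zerosOf (compE.getD a [])) b cnt zi covered marks) t compE := by
  intro cnt
  induction cnt with
  | zero => intro b zi covered marks t _ _ _ _; rfl
  | succ cnt' ih =>
    intro b zi covered marks t Hm Hcov Hzi Hpass
    have hgd : (applyMarks n a marks t compE).2.getD a []
        = applyOnes n.toNat (compE.getD a []) marks := by
      rw [applyMarks_eq n a marks t compE hC]
      exact getD_set_self' _ _ _ hC
    rw [loopA, loopG, PySem.List.pyGetD_natCast]
    by_cases hgb : pa.getD b false = true
    · rw [hgb]
      have hlim : (if covered > ((b : Int)) then covered else ((b : Int))) = max ((b : Int)) covered := by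
        split_ifs with h <;> omega
      rw [hlim]
      have hple := adv_passed_all (zerosOf (compE.getD a [])) (max ((b : Int)) covered) zi Hpass
      have hzile := adv_le_length' (zerosOf (compE.getD a [])) (max ((b : Int)) covered) zi Hzi
      have hcond := pointer_iff n (compE.getD a []) b zi covered Hzi Hpass
      have hciff := cond_iff n hn (compE.getD a []) marks covered b Hm Hcov
      by_cases hB : adv (zerosOf (compE.getD a [])) (max ((b : Int)) covered) zi < (zerosOf (compE.getD a [])).length ∧
          (zerosOf (compE.getD a [])).getD (adv (zerosOf (compE.getD a [])) (max ((b : Int)) covered) zi) 0 < (b : Int) + n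
      · have hfalse : pyAllNZ (PySem.List.slice ((applyMarks n a marks t compE).2.getD a [])
            (some (b : Int)) (some (n + (b : Int)))) = false := by
          rw [hgd]
          exact hciff.mpr (hcond.mp hB)
        rw [hfalse, if_pos hB]
        simp only [Bool.not_false, Bool.true_and, if_true]
        have hstep : loopA n pa a (b + 1) cnt'
              ((applyMarks n a marks t compE).1 ++ [[(a : Int), (a : Int), (b : Int), (b : Int) + n]])
              ((applyMarks n a marks t compE).2.set a
                (setOnes ((applyMarks n a marks t compE).2.getD a []) b n.toNat))
            = loopA n pa a (b + 1) cnt'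
              (applyMarks n a (marks ++ [b]) t compE).1 (applyMarks n a (marks ++ [b]) t compE).2 := by
          have : applyMarks n a (marks ++ [b]) t compE
              = ((applyMarks n a marks t compE).1 ++ [[(a : Int), (a : Int), (b : Int), (b : Int) + n]],
                 (applyMarks n a marks t compE).2.set a
                   (setOnes ((applyMarks n a marks t compE).2.getD a []) b n.toNat)) := by
            unfold applyMarks
            rw [List.foldl_append]
            rfl
          rw [this]
        rw [hstep]
        obtain ⟨k, hkb, hkcov, hklt, hk0⟩ := hcond.mp hB
        have hblen : b < (compE.getD a []).length :=
          lt_of_le_of_lt hkb (List.getElem?_eq_some_iff.mp hk0).1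
        have hcovle : covered ≤ (b : Int) + n := by
          rcases Hcov with rfl | ⟨bL, hbL, rfl⟩
          · omega
          · have := (Hm bL hbL).1
            omega
        apply ih (b + 1) (adv (zerosOf (compE.getD a [])) (max ((b : Int)) covered) zi)
          ((b : Int) + n) (marks ++ [b]) t
        · intro b' hb'
          rcases List.mem_append.mp hb' with h | h
          · exact ⟨by have := (Hm b' h).1; omega, (Hm b' h).2.1,
              le_trans (Hm b' h).2.2 hcovle⟩
          · simp at h
            subst h
            exact ⟨by omega, hblen, le_refl _⟩
        · exact Or.inr ⟨b, by simp, rfl⟩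
        · exact hzile
        · intro k' hk'
          have h1 := hple k' hk'
          have h2 : max ((b : Int)) covered ≤ (b : Int) + n := max_le (by omega) hcovle
          push_cast
          exact lt_of_lt_of_le h1 (le_trans h2 (le_max_right _ _))
      · have htrue : pyAllNZ (PySem.List.slice ((applyMarks n a marks t compE).2.getD a [])
            (some (b : Int)) (some (n + (b : Int)))) = true := by
          rcases Bool.eq_false_or_eq_true (pyAllNZ (PySem.List.slice ((applyMarks n a marks t compE).2.getD a [])
            (some (b : Int)) (some (n + (b : Int))))) with h | h
          · exact h
          · rw [hgd] at h
            exact absurd (hcond.mpr (hciff.mp h)) hB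
        rw [htrue, if_neg hB]
        simp only [Bool.not_true, Bool.and_false, Bool.false_eq_true, if_false]
        apply ih (b + 1) (adv (zerosOf (compE.getD a [])) (max ((b : Int)) covered) zi)
          covered marks t
        · exact fun b' h => ⟨by have := (Hm b' h).1; omega, (Hm b' h).2⟩
        · exact Hcov
        · exact hzile
        · intro k' hk'
          have h1 := hple k' hk'
          push_cast
          exact lt_of_lt_of_le h1 (max_le_max (by omega) le_rfl)
    · have hgbf : pa.getD b false = false := by simpa using hgb
      rw [hgbf]
      simp only [Bool.false_and, Bool.false_eq_true, if_false]
      apply ih (b + 1) zi covered marks t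
      · exact fun b' h => ⟨by have := (Hm b' h).1; omega, (Hm b' h).2⟩
      · exact Hcov
      · exact Hzi
      · intro k' hk'
        have h1 := Hpass k' hk'
        push_cast
        exact lt_of_lt_of_le h1 (max_le_max (by omega) le_rfl)

theorem rows_eq (n : Int) (hn : 1 ≤ n) :
    ∀ (rows : List (List Int)) (a : Nat) (t comp : List (List Int)),
      rowsA n (rows.map (fun row => windowsRow n row)) a t comp = rowsB n rows a t comp := by
  intro rows
  induction rows with
  | nil => intro a t comp; rfl
  | cons row rest ih =>
    intro a t comp
    rw [List.map_cons, rowsA, rowsB]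
    simp only []
    have hpa : runGood n row = windowsRow n row := by
      rw [windowsRow_eq_W n hn, runGood_eq_W n hn]
    have hcnt : (((windowsRow n row).length : Int) - n).toNat
        = ((row.length : Int) - 2 * n + 1).toNat := by
      rw [windowsRow_length]; omega
    by_cases hm : (row.length : Int) - 2 * n + 1 ≤ 0
    · rw [if_pos hm]
      have h0 : (((windowsRow n row).length : Int) - n).toNat = 0 := by
        rw [windowsRow_length]; omega
      rw [h0]
      exact ih _ _ _
    · rw [if_neg hm]
      by_cases hg : ((runGood n row).take ((row.length : Int) - 2 * n + 1).toNat).contains true = true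
      · rw [if_pos hg]
        by_cases hC : a < comp.length
        · have hle := loop_eq n hn a comp hC (windowsRow n row)
            ((row.length : Int) - 2 * n + 1).toNat 0 0 0 [] t
            (by simp) (Or.inl rfl) (by simp) (by simp)
          have hnil : applyMarks n a [] t comp = (t, comp) := rfl
          rw [hnil] at hle
          rw [hcnt, hle, hpa]
          exact ih _ _ _
        · have hCle : comp.length ≤ a := by omega
          rw [loopA_out n _ a _ 0 t comp hCle]
          have hz : zerosOf (comp.getD a []) = [] := by
            rw [List.getD_eq_default _ _ hCle]
            rfl
          rw [hz, loopG_znil]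
          exact ih _ _ _
      · rw [if_neg hg]
        have hlen : ((row.length : Int) - 2 * n + 1).toNat ≤ (windowsRow n row).length := by
          rw [windowsRow_length]; omega
        have hnog : ∀ k : Nat, 0 ≤ k → k < 0 + ((row.length : Int) - 2 * n + 1).toNat →
            (windowsRow n row).getD k false = false := by
          intro k _ hk
          have hk' : k < ((row.length : Int) - 2 * n + 1).toNat := by omega
          have hklen : k < (windowsRow n row).length := by omega
          rw [List.getD_eq_getElem _ _ hklen]
          by_contra hcon
          have htr : (windowsRow n row)[k] = true := by
            revert hcon; cases h : (windowsRow n row)[k] <;> simp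
          apply hg
          have hmem : true ∈ (runGood n row).take ((row.length : Int) - 2 * n + 1).toNat := by
            rw [hpa]
            rw [← htr]
            have hkt : k < ((windowsRow n row).take ((row.length : Int) - 2 * n + 1).toNat).length := by
              simp [List.length_take]; omega
            have : ((windowsRow n row).take ((row.length : Int) - 2 * n + 1).toNat)[k] = (windowsRow n row)[k] := by
              rw [List.getElem_take]
            rw [← this]
            exact List.getElem_mem hkt
          simpa using hmem
        rw [hcnt, loopA_nogood n _ a _ 0 t comp hnog]
        exact ih _ _ _

theorem main_eq (n : Int) (table comp : List (List Int))
    (hp : Pre_recherche_ligne n table comp) :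
    recherche_ligne n table comp = recherche_ligne_alt n table comp := by
  by_cases hn : n ≤ 0
  · simp only [recherche_ligne, recherche_ligne_alt, if_pos hn]
    rcases hp.1 with h0 | htab
    · have hz : n = 0 := le_antisymm hn h0
      subst hz
      exact rowsA_zero _ 0 [] comp
    · subst htab
      rfl
  · simp only [recherche_ligne, recherche_ligne_alt, if_neg hn]
    exact rows_eq n (by omega) table 0 [] comp

-- ===== VERDICT (by name: the statement is the Claim_ definition above) =====
theorem recherche_ligne_spec : Claim_equal_recherche_ligne := by
  intro n table comp _ hpre
  exact main_eq n table comp hpre
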